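-- pv_equiv track=rewrite | github.com/Gppovrm/Algorithms_Labs | Laba_2/дополнительные_задачи/з_9_удаление_поддеревьев_2_балла.py | delete_subtree_node
-- ===== SOURCE A (Python) =====
-- def delete_subtree_node(bst, key):
--     try:
--         left_k, right_k = bst[key][0], bst[key][1]
--         bst.pop(key)
--         if left_k is not None:
--             delete_subtree_node(bst, left_k)
--         if right_k is not None:
--             delete_subtree_node(bst, right_k)
--     except:
--         pass
--     return len(bst)
-- ===== SOURCE B (Python) =====
-- def delete_subtree_node(bst, key):
--     stack = [key]
--     while stack:
--         k = stack.pop()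
--         try:
--             left_k, right_k = bst[k][0], bst[k][1]
--             bst.pop(k)
--         except:
--             continue
--         if right_k is not None:
--             stack.append(right_k)
--         if left_k is not None:
--             stack.append(left_k)
--     return len(bst)
-- ===== Notes on version B (the rewrite author's own statement) =====
-- stated objective: alternative
-- what changed: Replaces the per-node recursion (with a bare try/except in each call) by an iterative DFS with an explicit worklist stack seeded with the key, popping nodes and pushing children right-then-left so the visit order is identical.
import Mathlib
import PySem

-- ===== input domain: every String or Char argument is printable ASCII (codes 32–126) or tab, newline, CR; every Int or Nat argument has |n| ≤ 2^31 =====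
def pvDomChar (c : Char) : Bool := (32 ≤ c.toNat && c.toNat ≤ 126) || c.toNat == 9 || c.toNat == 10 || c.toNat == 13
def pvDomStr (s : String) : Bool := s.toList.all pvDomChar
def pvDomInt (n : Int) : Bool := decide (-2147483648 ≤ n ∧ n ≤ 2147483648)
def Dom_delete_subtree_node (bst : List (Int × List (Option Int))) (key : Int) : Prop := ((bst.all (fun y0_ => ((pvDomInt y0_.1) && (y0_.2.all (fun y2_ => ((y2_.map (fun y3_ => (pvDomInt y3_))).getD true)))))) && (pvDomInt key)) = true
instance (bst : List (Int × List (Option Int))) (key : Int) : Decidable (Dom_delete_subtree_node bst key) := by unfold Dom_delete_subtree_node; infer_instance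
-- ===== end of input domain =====

-- B replaces A's recursion by an iterative DFS with an explicit stack (same visit order);
-- both A and B mutate the caller's dict in the same way (all reachable nodes popped) — the
-- equivalence proved here is about the return value (the final dict size).

-- termination helper for both ports: popping a present key strictly shrinks the dict
theorem pv_erase_size_lt {ν : Type} (d : PySem.Dict Int ν) (k : Int) (v : ν)
    (h : d.get? k = some v) : (d.erase k).size < d.size := by
  simp only [PySem.Dict.get?, Option.map_eq_some_iff] at h
  obtain ⟨p, hp, -⟩ := h
  have hmem := List.mem_of_find?_eq_some hp
  have hbeq := List.find?_some hp
  simp only [PySem.Dict.erase, PySem.Dict.size]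
  exact List.length_filter_lt_length_iff_exists.mpr ⟨p, hmem, by simp [hbeq]⟩

-- ===== PORT A =====
-- A's recursion: try to read bst[key][0], bst[key][1], pop key, recurse on non-None children;
-- any failure (missing key / too-short value) is swallowed.  The subtype carries the
-- size bound needed only for termination.
def pvAuxA (d : PySem.Dict Int (List (Option Int))) (k : Int) :
    {d' : PySem.Dict Int (List (Option Int)) // d'.size ≤ d.size} :=
  match h : d.get? k with
  | none => ⟨d, Nat.le_refl _⟩
  | some v =>
    match PySem.List.pyGet? v 0, PySem.List.pyGet? v 1 with
    | some l, some r =>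
      let d1 := d.erase k
      have h1 : d1.size < d.size := pv_erase_size_lt d k v h
      let d2 : {d' : PySem.Dict Int (List (Option Int)) // d'.size ≤ d1.size} :=
        match l with
        | some lk => pvAuxA d1 lk
        | none => ⟨d1, Nat.le_refl _⟩
      let d3 : {d' : PySem.Dict Int (List (Option Int)) // d'.size ≤ d2.val.size} :=
        match r with
        | some rk => pvAuxA d2.val rk
        | none => ⟨d2.val, Nat.le_refl _⟩
      ⟨d3.val, Nat.le_of_lt (Nat.lt_of_le_of_lt (Nat.le_trans d3.property d2.property) h1)⟩
    | _, _ => ⟨d, Nat.le_refl _⟩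
termination_by d.size
decreasing_by
  · exact h1
  · exact Nat.lt_of_le_of_lt d2.property h1

def delete_subtree_node (bst : List (Int × List (Option Int))) (key : Int) : Int :=
  ((pvAuxA (PySem.Dict.ofList bst) key).val.size : Int)

-- ===== PORT B =====
-- B's loop: pop the top of the stack, try to read the node and pop it from the dict,
-- push right then left child (so the left child is processed first).
def pvLoopB (d : PySem.Dict Int (List (Option Int))) (stack : List Int) :
    PySem.Dict Int (List (Option Int)) :=
  match stack with
  | [] => d
  | k :: rest =>
    match h : d.get? k with
    | none => pvLoopB d rest
    | some v =>
      match PySem.List.pyGet? v 0, PySem.List.pyGet? v 1 with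
      | some l, some r =>
        let d1 := d.erase k
        have h1 : d1.size < d.size := pv_erase_size_lt d k v h
        let st1 : List Int := match r with | some rk => rk :: rest | none => rest
        let st2 : List Int := match l with | some lk => lk :: st1 | none => st1
        pvLoopB d1 st2
      | _, _ => pvLoopB d rest
termination_by (d.size, stack.length)
decreasing_by
  · exact Prod.Lex.right _ (Nat.lt_succ_self _)
  · exact Prod.Lex.left _ _ h1
  · exact Prod.Lex.right _ (Nat.lt_succ_self _)

def delete_subtree_node_alt (bst : List (Int × List (Option Int))) (key : Int) : Int :=
  ((pvLoopB (PySem.Dict.ofList bst) [key]).size : Int)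

-- ===== PRECONDITION & SPEC =====
def Spec_delete_subtree_node (bst : List (Int × List (Option Int))) (key : Int) (out : Int) : Prop := out = delete_subtree_node_alt bst key
instance (bst : List (Int × List (Option Int))) (key : Int) (out : Int) : Decidable (Spec_delete_subtree_node bst key out) := by unfold Spec_delete_subtree_node; infer_instance

-- ===== CLAIM (what is proved, stated in full; the proofs are below) =====
def Claim_equal_delete_subtree_node : Prop := ∀ (bst : List (Int × List (Option Int))) (key : Int), Dom_delete_subtree_node bst key → Spec_delete_subtree_node bst key (delete_subtree_node bst key)

-- ===== LEMMAS AND PROOFS =====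

-- the explicit stack simulates the recursion: processing the top of the stack is pvAuxA
theorem pv_loop_step :
    ∀ (n : Nat) (d : PySem.Dict Int (List (Option Int))), d.size ≤ n →
      ∀ (k : Int) (rest : List Int),
        pvLoopB d (k :: rest) = pvLoopB (pvAuxA d k).val rest := by
  intro n
  induction n using Nat.strong_induction_on with
  | _ n IH =>
    intro d hd k rest
    rw [pvLoopB, pvAuxA]
    split
    next => rfl
    next v heq =>
      split
      next _ _ lv rv hl hr =>
        have hlt : (d.erase k).size < d.size := pv_erase_size_lt d k v heq
        have hsz : (d.erase k).size ≤ n - 1 := by omega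
        have hm : n - 1 < n := by omega
        cases lv with
        | none =>
          cases rv with
          | none => rfl
          | some rk =>
            exact IH (n - 1) hm _ hsz rk rest
        | some lk =>
          cases rv with
          | none =>
            exact IH (n - 1) hm _ hsz lk rest
          | some rk =>
            show pvLoopB (d.erase k) (lk :: rk :: rest) = _
            rw [IH (n - 1) hm _ hsz lk (rk :: rest)]
            exact IH (n - 1) hm _ (Nat.le_trans (pvAuxA (d.erase k) lk).property hsz) rk rest
      next => rfl

-- ===== VERDICT (by name: the statement is the Claim_ definition above) =====
theorem delete_subtree_node_spec : Claim_equal_delete_subtree_node := by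
  intro bst key _
  unfold Spec_delete_subtree_node delete_subtree_node delete_subtree_node_alt
  rw [pv_loop_step (PySem.Dict.ofList bst).size _ (Nat.le_refl _) key []]
  rw [pvLoopB]
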